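-- pv_equiv track=rewrite | github.com/bulbulator228/prigramirovanie | maxOlenKonskayaZalupa/vyz/день 13.py | rectangle_squares
-- ===== SOURCE A (Python) =====
-- def rectangle_squares(length, width):
--     squares = {}
--     while length != 0 and width != 0:
--         if length >= width:
--             count = length // width
--             squares[width] = squares.get(width, 0) + count
--             length = length % width
--         else:
--             count = width // length
--             squares[length] = squares.get(length, 0) + count
--             width = width % length
--     return squares
-- ===== SOURCE B (Python) =====
-- def rectangle_squares(length, width):
--     if length == 0 or width == 0:
--         return {}
--     if length >= width:
--         larger, smaller = length, width
--     else:
--         larger, smaller = width, length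
--     count = larger // smaller
--     rest = rectangle_squares(larger % smaller, smaller)
--     merged = {smaller: rest.pop(smaller, 0) + count}
--     merged.update(rest)
--     return merged
-- ===== Notes on version B (the rewrite author's own statement) =====
-- stated objective: alternative
-- what changed: Replaces the while-loop that threads a mutable dict accumulator with a recursion over the Euclidean reduction that builds the result dict back-to-front by merging {smaller: count} onto the recursive result.
import Mathlib
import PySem

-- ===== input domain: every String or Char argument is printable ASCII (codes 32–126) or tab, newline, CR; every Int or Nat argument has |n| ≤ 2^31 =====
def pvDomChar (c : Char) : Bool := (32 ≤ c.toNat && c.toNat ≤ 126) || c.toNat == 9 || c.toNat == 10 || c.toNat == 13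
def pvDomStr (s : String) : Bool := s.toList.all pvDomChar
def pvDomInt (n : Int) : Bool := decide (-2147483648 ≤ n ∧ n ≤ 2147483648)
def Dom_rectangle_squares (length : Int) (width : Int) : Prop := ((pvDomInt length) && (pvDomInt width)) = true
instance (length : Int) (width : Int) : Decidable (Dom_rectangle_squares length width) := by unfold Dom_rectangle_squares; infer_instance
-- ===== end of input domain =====

-- B replaces A's while-loop with a dict accumulator by a recursion over the Euclidean
-- reduction that merges {smaller: count} onto the recursive result (alternative decomposition,
-- same cost). Equality of the return value is proved on nonnegative inputs.

-- ===== PORT A =====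
-- the while-loop of A; the fuel argument only makes the recursion total in Lean, it is
-- large enough on Pre_ (the sum of the sides strictly decreases at each iteration)
def rsLoopA : Nat → Int → Int → PySem.Dict Int Int → PySem.Dict Int Int
  | 0, _, _, d => d
  | fuel+1, length, width, d =>
    if length ≠ 0 ∧ width ≠ 0 then
      if length ≥ width then
        rsLoopA fuel (PySem.Int.mod length width) width
          (d.insert width (d.getD width 0 + PySem.Int.floordiv length width))
      else
        rsLoopA fuel length (PySem.Int.mod width length)
          (d.insert length (d.getD length 0 + PySem.Int.floordiv width length))
    else d

def rectangle_squares (length : Int) (width : Int) : List (Int × Int) :=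
  (rsLoopA (length.toNat + width.toNat + 1) length width PySem.Dict.empty).items

-- ===== PORT B =====
-- B's recursion; the fuel argument only makes it total in Lean (sufficient on Pre_)
def rsRecB : Nat → Int → Int → PySem.Dict Int Int
  | 0, _, _ => PySem.Dict.empty
  | fuel+1, length, width =>
    if length = 0 ∨ width = 0 then PySem.Dict.empty
    else
      let larger := if length ≥ width then length else width
      let smaller := if length ≥ width then width else length
      let count := PySem.Int.floordiv larger smaller
      let rest := rsRecB fuel (PySem.Int.mod larger smaller) smaller
      -- merged = {smaller: rest.pop(smaller, 0) + count}; merged.update(rest)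
      (PySem.Dict.empty.insert smaller (rest.getD smaller 0 + count)).update (rest.erase smaller).items

def rectangle_squares_alt (length : Int) (width : Int) : List (Int × Int) :=
  (rsRecB (length.toNat + width.toNat + 1) length width).items

-- ===== PRECONDITION & SPEC =====
-- Pre_ is exactly the set of inputs on which A's while-loop terminates; it excludes the
-- inputs with a negative side on which the Euclidean reduction stalls and A loops forever
-- (B's recursion does not terminate there either).
def Pre_rectangle_squares (length : Int) (width : Int) : Prop :=
  length = 0 ∨ width = 0 ∨ (0 ≤ length ∧ 0 ≤ width) ∨ length = width ∨
  (length < 0 ∧ 0 < width ∧ PySem.Int.mod width length = 0) ∨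
  (width < 0 ∧ 0 < length ∧ PySem.Int.mod length width = 0)
instance (length : Int) (width : Int) : Decidable (Pre_rectangle_squares length width) := by
  unfold Pre_rectangle_squares; infer_instance
def pvWitness_rectangle_squares : Int × Int := (6, 4)

def Spec_rectangle_squares (length : Int) (width : Int) (out : List (Int × Int)) : Prop :=
  out = rectangle_squares_alt length width
instance (length : Int) (width : Int) (out : List (Int × Int)) : Decidable (Spec_rectangle_squares length width out) := by
  unfold Spec_rectangle_squares; infer_instance

-- ===== CLAIM (what is proved, stated in full; the proofs are below) =====
def Claim_equal_rectangle_squares : Prop := ∀ (length : Int) (width : Int),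
  Dom_rectangle_squares length width → Pre_rectangle_squares length width →
  Spec_rectangle_squares length width (rectangle_squares length width)

-- ===== LEMMAS AND PROOFS =====

-- A's loop and B's recursion stop at once when a side is zero
lemma loopA_zero (fuel : Nat) (l w : Int) (d : PySem.Dict Int Int) (h : l = 0 ∨ w = 0) :
    rsLoopA fuel l w d = d := by
  cases fuel with
  | zero => rfl
  | succ fuel => simp only [rsLoopA]; rw [if_neg (by tauto)]

lemma recB_zero (fuel : Nat) (l w : Int) (h : l = 0 ∨ w = 0) :
    rsRecB fuel l w = PySem.Dict.empty := by
  cases fuel with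
  | zero => rfl
  | succ fuel => simp only [rsRecB]; rw [if_pos h]

lemma pymod_self (l : Int) : PySem.Int.mod l l = 0 := by
  unfold PySem.Int.mod; exact Int.fmod_self

-- merging a singleton dict with the empty rest is that singleton
lemma update_erase_empty (s v : Int) :
    ((PySem.Dict.empty.insert s v).update
      ((PySem.Dict.empty : PySem.Dict Int Int).erase s).items).items
    = (PySem.Dict.empty.insert s v).items := rfl

-- merging {s: rest.pop(s,0)+c} with rest, when all keys of rest are < s, prepends (s, c)
lemma merge_items (rest : PySem.Dict Int Int) (s c : Int)
    (hb : ∀ k ∈ rest.keys, k < s) (hnd : rest.keys.Nodup) :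
    ((PySem.Dict.empty.insert s (rest.getD s 0 + c)).update (rest.erase s).items).items
      = (s, c) :: rest.items := by
  have hsmem : s ∉ rest.keys := fun h => absurd (hb s h) (by omega)
  have hcont : rest.contains s = false := by
    rw [← Bool.not_eq_true, PySem.Dict.contains_iff_mem_keys]; exact hsmem
  have hgd : rest.getD s 0 = 0 := PySem.Dict.getD_of_not_contains rest 0 hcont
  have herase : rest.erase s = rest := by
    apply PySem.Dict.ext
    show rest.items.filter _ = rest.items
    apply List.filter_eq_self.mpr
    intro p hp
    have h1 := hb _ (PySem.Dict.mem_keys_of_mem_items rest hp)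
    simp; omega
  rw [hgd, herase]
  show ((rest.items).foldl (fun d p => d.insert p.1 p.2) (PySem.Dict.empty.insert s (0 + c))).items = _
  rw [PySem.Dict.items_foldl_insert_fresh rest.items Prod.fst Prod.snd _ ?fresh ?nd]
  case fresh =>
    intro p hp
    have h1 := hb _ (PySem.Dict.mem_keys_of_mem_items rest hp)
    rw [PySem.Dict.contains_insert]
    simp [PySem.Dict.contains_empty]
    omega
  case nd => exact hnd
  rw [PySem.Dict.items_insert_of_not_contains _ _ (by simp [PySem.Dict.contains_empty])]
  simp [PySem.Dict.empty]

-- Python's l % w for a positive divisor lies in [0, w)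
lemma mod_bounds (l w : Int) (hw : 0 < w) : 0 ≤ PySem.Int.mod l w ∧ PySem.Int.mod l w < w := by
  unfold PySem.Int.mod
  exact ⟨Int.fmod_nonneg_of_pos l hw, Int.fmod_lt_of_pos l hw⟩

-- keys of B's result are bounded by both sides and have no duplicates
lemma recB_inv (fuel : Nat) : ∀ (l w : Int), 0 ≤ l → 0 ≤ w →
    (∀ k ∈ (rsRecB fuel l w).keys, k ≤ l ∧ k ≤ w) ∧ (rsRecB fuel l w).keys.Nodup := by
  induction fuel with
  | zero =>
    intro l w _ _
    constructor
    · intro k hk; simp [rsRecB, PySem.Dict.keys_empty] at hk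
    · simp [rsRecB, PySem.Dict.keys_empty]
  | succ fuel ih =>
    intro l w hl hw
    by_cases h0 : l = 0 ∨ w = 0
    · constructor
      · intro k hk; simp [rsRecB, h0, PySem.Dict.keys_empty] at hk
      · simp [rsRecB, h0, PySem.Dict.keys_empty]
    · rw [not_or] at h0
      have hl' : 0 < l := lt_of_le_of_ne hl (Ne.symm h0.1)
      have hw' : 0 < w := lt_of_le_of_ne hw (Ne.symm h0.2)
      by_cases hge : l ≥ w
      · -- smaller = w
        have hm := mod_bounds l w hw'
        obtain ⟨ihb, ihnd⟩ := ih (PySem.Int.mod l w) w hm.1 hw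
        have hb : ∀ k ∈ (rsRecB fuel (PySem.Int.mod l w) w).keys, k < w := by
          intro k hk; have := ihb k hk; omega
        have hitems : (rsRecB (fuel+1) l w).items
            = (w, PySem.Int.floordiv l w) :: (rsRecB fuel (PySem.Int.mod l w) w).items := by
          rw [show rsRecB (fuel+1) l w
              = (PySem.Dict.empty.insert w ((rsRecB fuel (PySem.Int.mod l w) w).getD w 0
                  + PySem.Int.floordiv l w)).update
                  ((rsRecB fuel (PySem.Int.mod l w) w).erase w).items by
            simp only [rsRecB]
            rw [if_neg (not_or.mpr ⟨h0.1, h0.2⟩)]; simp only [if_pos hge]]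
          exact merge_items _ _ _ hb ihnd
        have hkeys : (rsRecB (fuel+1) l w).keys
            = w :: (rsRecB fuel (PySem.Int.mod l w) w).keys := by
          show (rsRecB (fuel+1) l w).items.map _ = _
          rw [hitems]; rfl
        rw [hkeys]
        constructor
        · intro k hk
          rcases List.mem_cons.mp hk with h | h
          · omega
          · have h1 := ihb k h; have h2 := hb k h; omega
        · exact List.nodup_cons.mpr ⟨fun h => absurd (hb w h) (by omega), ihnd⟩
      · -- smaller = l
        have hm := mod_bounds w l hl'
        obtain ⟨ihb, ihnd⟩ := ih (PySem.Int.mod w l) l hm.1 hl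
        have hb : ∀ k ∈ (rsRecB fuel (PySem.Int.mod w l) l).keys, k < l := by
          intro k hk; have := ihb k hk; omega
        have hitems : (rsRecB (fuel+1) l w).items
            = (l, PySem.Int.floordiv w l) :: (rsRecB fuel (PySem.Int.mod w l) l).items := by
          rw [show rsRecB (fuel+1) l w
              = (PySem.Dict.empty.insert l ((rsRecB fuel (PySem.Int.mod w l) l).getD l 0
                  + PySem.Int.floordiv w l)).update
                  ((rsRecB fuel (PySem.Int.mod w l) l).erase l).items by
            simp only [rsRecB]
            rw [if_neg (not_or.mpr ⟨h0.1, h0.2⟩)]; simp only [if_neg hge]]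
          exact merge_items _ _ _ hb ihnd
        have hkeys : (rsRecB (fuel+1) l w).keys
            = l :: (rsRecB fuel (PySem.Int.mod w l) l).keys := by
          show (rsRecB (fuel+1) l w).items.map _ = _
          rw [hitems]; rfl
        rw [hkeys]
        constructor
        · intro k hk
          rcases List.mem_cons.mp hk with h | h
          · omega
          · have h1 := ihb k h; have h2 := hb k h; omega
        · exact List.nodup_cons.mpr ⟨fun h => absurd (hb l h) (by omega), ihnd⟩

-- one unfolding of B's recursion, as an items equation
lemma recB_step (fuel : Nat) (l w : Int) (hl : 0 < l) (hw : 0 < w) (hge : w ≤ l) :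
    (rsRecB (fuel+1) l w).items
      = (w, PySem.Int.floordiv l w) :: (rsRecB fuel (PySem.Int.mod l w) w).items := by
  have hm := mod_bounds l w hw
  obtain ⟨ihb, ihnd⟩ := recB_inv fuel (PySem.Int.mod l w) w hm.1 (le_of_lt hw)
  have hb : ∀ k ∈ (rsRecB fuel (PySem.Int.mod l w) w).keys, k < w := by
    intro k hk; have := ihb k hk; omega
  rw [show rsRecB (fuel+1) l w
      = (PySem.Dict.empty.insert w ((rsRecB fuel (PySem.Int.mod l w) w).getD w 0
          + PySem.Int.floordiv l w)).update
          ((rsRecB fuel (PySem.Int.mod l w) w).erase w).items by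
    simp only [rsRecB]
    rw [if_neg (not_or.mpr ⟨by omega, by omega⟩)]; simp only [if_pos (show l ≥ w from hge)]]
  exact merge_items _ _ _ hb ihnd

-- B's recursion is symmetric in its two sides
lemma recB_comm (fuel : Nat) (l w : Int) : rsRecB fuel l w = rsRecB fuel w l := by
  cases fuel with
  | zero => rfl
  | succ fuel =>
    simp only [rsRecB]
    by_cases h0 : l = 0 ∨ w = 0
    · rw [if_pos h0, if_pos (show w = 0 ∨ l = 0 by tauto)]
    · rw [if_neg h0, if_neg (show ¬ (w = 0 ∨ l = 0) by tauto)]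
      rcases lt_trichotomy l w with h | h | h
      · simp only [if_neg (show ¬ l ≥ w by omega), if_pos (show w ≥ l by omega)]
      · subst h; rfl
      · simp only [if_pos (show l ≥ w by omega), if_neg (show ¬ w ≥ l by omega)]

-- A's loop extends the accumulator by exactly B's result when the accumulator's keys
-- are all larger than the smaller of the current sides
lemma loop_eq (fuel : Nat) : ∀ (l w : Int) (d : PySem.Dict Int Int), 0 ≤ l → 0 ≤ w →
    (∀ k ∈ d.keys, l < k ∨ w < k) →
    (rsLoopA fuel l w d).items = d.items ++ (rsRecB fuel l w).items := by
  induction fuel with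
  | zero => intro l w d _ _ _; simp [rsLoopA, rsRecB, PySem.Dict.empty]
  | succ fuel ih =>
    intro l w d hl hw hkeys
    by_cases h0 : l ≠ 0 ∧ w ≠ 0
    · have hl' : 0 < l := lt_of_le_of_ne hl (Ne.symm h0.1)
      have hw' : 0 < w := lt_of_le_of_ne hw (Ne.symm h0.2)
      by_cases hge : l ≥ w
      · -- A takes the first branch, inserting key w
        have hm := mod_bounds l w hw'
        have hwmem : w ∉ d.keys := fun h => by rcases hkeys w h with h' | h' <;> omega
        have hcont : d.contains w = false := by
          rw [← Bool.not_eq_true, PySem.Dict.contains_iff_mem_keys]; exact hwmem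
        have hstep : rsLoopA (fuel+1) l w d
            = rsLoopA fuel (PySem.Int.mod l w) w
                (d.insert w (d.getD w 0 + PySem.Int.floordiv l w)) := by
          simp only [rsLoopA]
          rw [if_pos h0]; simp only [if_pos hge]
        rw [hstep, ih (PySem.Int.mod l w) w _ hm.1 hw ?cond, recB_step fuel l w hl' hw' hge]
        case cond =>
          intro k hk
          rw [PySem.Dict.keys_insert_of_not_contains _ _ hcont] at hk
          rcases List.mem_append.mp hk with h | h
          · rcases hkeys k h with h' | h' <;> omega
          · simp at h; omega
        rw [PySem.Dict.getD_of_not_contains _ _ hcont,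
            PySem.Dict.items_insert_of_not_contains _ _ hcont, zero_add]
        simp
      · -- A takes the second branch, inserting key l
        have hlt : l < w := by omega
        have hm := mod_bounds w l hl'
        have hlmem : l ∉ d.keys := fun h => by rcases hkeys l h with h' | h' <;> omega
        have hcont : d.contains l = false := by
          rw [← Bool.not_eq_true, PySem.Dict.contains_iff_mem_keys]; exact hlmem
        have hstep : rsLoopA (fuel+1) l w d
            = rsLoopA fuel l (PySem.Int.mod w l)
                (d.insert l (d.getD l 0 + PySem.Int.floordiv w l)) := by
          simp only [rsLoopA]
          rw [if_pos h0]; simp only [if_neg hge]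
        rw [hstep, ih l (PySem.Int.mod w l) _ hl hm.1 ?cond, recB_comm (fuel+1) l w,
            recB_step fuel w l hw' hl' (le_of_lt hlt), recB_comm fuel l (PySem.Int.mod w l)]
        case cond =>
          intro k hk
          rw [PySem.Dict.keys_insert_of_not_contains _ _ hcont] at hk
          rcases List.mem_append.mp hk with h | h
          · rcases hkeys k h with h' | h' <;> omega
          · simp at h; omega
        rw [PySem.Dict.getD_of_not_contains _ _ hcont,
            PySem.Dict.items_insert_of_not_contains _ _ hcont, zero_add]
        simp
    · have h0' : l = 0 ∨ w = 0 := by tauto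
      simp only [rsLoopA, rsRecB]
      rw [if_neg h0, if_pos h0']
      simp [PySem.Dict.empty]

-- ===== VERDICT (by name: the statement is the Claim_ definition above) =====
theorem rectangle_squares_spec : Claim_equal_rectangle_squares := by
  intro l w _ hpre
  unfold Spec_rectangle_squares rectangle_squares rectangle_squares_alt
  by_cases hz : l = 0 ∨ w = 0
  · rw [loopA_zero _ _ _ _ hz, recB_zero _ _ _ hz]
  rw [not_or] at hz
  by_cases hnn : 0 ≤ l ∧ 0 ≤ w
  · -- both sides nonnegative: the inductive loop/recursion correspondence
    have h := loop_eq (l.toNat + w.toNat + 1) l w PySem.Dict.empty hnn.1 hnn.2 (by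
      intro k hk; simp [PySem.Dict.keys_empty] at hk)
    simpa [PySem.Dict.items] using h
  by_cases heq : l = w
  · -- a square (possibly negative): one division step and both stop
    subst heq
    simp only [rsLoopA, rsRecB]
    rw [if_pos ⟨hz.1, hz.1⟩, if_neg (not_or.mpr ⟨hz.1, hz.1⟩)]
    simp only [if_pos (show l ≥ l from le_refl l)]
    rw [pymod_self, loopA_zero _ _ _ _ (Or.inl rfl), recB_zero _ _ _ (Or.inl rfl),
        update_erase_empty]
  · -- one negative side dividing the positive one: one division step and both stop
    rcases hpre with h | h | h | h | ⟨hln, hwp, hmod⟩ | ⟨hwn, hlp, hmod⟩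
    · exact absurd h hz.1
    · exact absurd h hz.2
    · exact absurd h hnn
    · exact absurd h heq
    · simp only [rsLoopA, rsRecB]
      rw [if_pos ⟨hz.1, hz.2⟩, if_neg (not_or.mpr ⟨hz.1, hz.2⟩)]
      simp only [if_neg (show ¬ l ≥ w by omega)]
      rw [hmod, loopA_zero _ _ _ _ (Or.inr rfl), recB_zero _ _ _ (Or.inl rfl),
          update_erase_empty]
    · simp only [rsLoopA, rsRecB]
      rw [if_pos ⟨hz.1, hz.2⟩, if_neg (not_or.mpr ⟨hz.1, hz.2⟩)]
      simp only [if_pos (show l ≥ w by omega)]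
      rw [hmod, loopA_zero _ _ _ _ (Or.inl rfl), recB_zero _ _ _ (Or.inl rfl),
          update_erase_empty]
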